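-- pv_equiv track=rewrite | github.com/matslindh/codingchallenges | adventofcode2020/09.py | addifier
-- ===== SOURCE A (Python) =====
-- def addifier(numbers, window=25):
--     idx = window
--
--     for number in numbers[idx:]:
--         i2 = idx - window
--         found = False
--
--         for inner_offset, n1 in enumerate(numbers[i2:idx-1]):
--             for n2 in numbers[i2+inner_offset+1:idx]:
--                 if n1 + n2 == number:
--                     found = True
--
--                 if found:
--                     break
--
--             if found:
--                 break
--
--         if not found:
--             return number
--
--         idx += 1
-- ===== SOURCE B (Python) =====
-- def addifier(numbers, window=25):
--     # hash-set two-sum per window: O(n*w) instead of A's O(n*w^2)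
--     for off, target in enumerate(numbers[window:]):
--         seen = set()
--         ok = False
--         for x in numbers[off:off + window]:
--             if target - x in seen:
--                 ok = True
--                 break
--             seen.add(x)
--         if not ok:
--             return target
--     return None
-- ===== Notes on version B (the rewrite author's own statement) =====
-- stated objective: faster
-- what changed: Replaced A's quadratic all-pairs scan over each sliding window by a single-pass hash-set two-sum check per window, removing the two nested inner loops.
import Mathlib
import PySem

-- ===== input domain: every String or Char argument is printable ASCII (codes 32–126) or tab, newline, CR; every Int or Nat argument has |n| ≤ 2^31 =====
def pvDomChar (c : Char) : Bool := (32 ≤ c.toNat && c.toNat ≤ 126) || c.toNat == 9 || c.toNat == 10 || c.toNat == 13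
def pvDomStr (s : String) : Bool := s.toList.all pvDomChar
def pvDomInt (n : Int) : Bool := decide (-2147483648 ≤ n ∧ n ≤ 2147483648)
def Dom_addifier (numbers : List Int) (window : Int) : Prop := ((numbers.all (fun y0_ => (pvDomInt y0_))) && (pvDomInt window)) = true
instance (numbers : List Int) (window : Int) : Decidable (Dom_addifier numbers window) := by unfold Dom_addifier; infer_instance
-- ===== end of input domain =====

-- B replaces A's quadratic pair scan per window by a one-pass hash-set two-sum check (objective: faster).


-- ===== PORT A =====
-- inner 'for n2 in numbers[i2+inner_offset+1:idx]' with the found/break flag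
def aInner2 (t n1 : Int) : List Int → Bool
  | [] => false
  | n2 :: rest => if n1 + n2 == t then true else aInner2 t n1 rest

-- 'for inner_offset, n1 in enumerate(numbers[i2:idx-1])' with the found/break flag
def aInner1 (nums : List Int) (i2 idx t : Int) : List Int → Int → Bool
  | [], _ => false
  | n1 :: rest, off =>
      if aInner2 t n1 (PySem.List.slice nums (some (i2 + off + 1)) (some idx)) then true
      else aInner1 nums i2 idx t rest (off + 1)

-- outer 'for number in numbers[idx:]' carrying idx
def aOuter (nums : List Int) (window : Int) : List Int → Int → Option Int
  | [], _ => none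
  | number :: rest, idx =>
      if aInner1 nums (idx - window) idx number
           (PySem.List.slice nums (some (idx - window)) (some (idx - 1))) 0
      then aOuter nums window rest (idx + 1)
      else some number

def addifier (numbers : List Int) (window : Int) : Option Int :=
  aOuter numbers window (PySem.List.slice numbers (some window) none) window

-- ===== PORT B =====
-- one-pass two-sum over the window with a 'seen' set
def bScan (t : Int) : List Int → PySem.Set Int → Bool
  | [], _ => false
  | x :: rest, seen =>
      if PySem.Set.contains seen (t - x) then true
      else bScan t rest (PySem.Set.add seen x)

-- 'for off, target in enumerate(numbers[window:])'
def bOuter (nums : List Int) (window : Int) : List Int → Int → Option Int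
  | [], _ => none
  | target :: rest, off =>
      if bScan target (PySem.List.slice nums (some off) (some (off + window))) PySem.Set.empty
      then bOuter nums window rest (off + 1)
      else some target

def addifier_alt (numbers : List Int) (window : Int) : Option Int :=
  bOuter numbers window (PySem.List.slice numbers (some window) none) 0

-- ===== PRECONDITION & SPEC =====
def Spec_addifier (numbers : List Int) (window : Int) (out : Option Int) : Prop := out = addifier_alt numbers window
instance (numbers : List Int) (window : Int) (out : Option Int) : Decidable (Spec_addifier numbers window out) := by unfold Spec_addifier; infer_instance

-- ===== CLAIM (what is proved, stated in full; the proofs are below) =====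
def Claim_equal_addifier : Prop := ∀ (numbers : List Int) (window : Int), Dom_addifier numbers window → Spec_addifier numbers window (addifier numbers window)

-- ===== LEMMAS AND PROOFS =====

-- proof-only: "some pair of distinct positions of l sums to t" as a structural scan
def pairEx (t : Int) : List Int → Bool
  | [] => false
  | x :: rest => aInner2 t x rest || pairEx t rest

-- slicing with a natural start: clamp only the stop
theorem sliceNat (nums : List Int) (a : ℕ) (b : ℤ) :
    PySem.List.slice nums (some (a : Int)) (some b)
      = (nums.drop a).take (PySem.List.clampIdx nums.length b - a) := by
  simp only [PySem.List.slice, PySem.List.clampIdx_natCast]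
  by_cases h : a ≤ nums.length
  · rw [min_eq_left h]
  · rw [min_eq_right (by omega), List.drop_eq_nil_of_le (le_refl nums.length),
      List.drop_eq_nil_of_le (by omega)]
    simp

-- a later slice with the same stop is a drop of the earlier one
theorem sliceDrop (nums : List Int) (o s : ℕ) (idx : Int) (h : o ≤ s) :
    PySem.List.slice nums (some (s : Int)) (some idx)
      = (PySem.List.slice nums (some (o : Int)) (some idx)).drop (s - o) := by
  rw [sliceNat, sliceNat, List.drop_take, List.drop_drop]
  congr 1
  · omega
  · congr 1
    omega

-- (take m l).dropLast, for m within range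
theorem take_dropLast (l : List Int) (m : ℕ) (h : m ≤ l.length) :
    (l.take m).dropLast = l.take (m - 1) := by
  rw [List.dropLast_eq_take, List.length_take, List.take_take]
  congr 1
  omega

theorem aInner2_any (t n1 : Int) (l : List Int) :
    aInner2 t n1 l = l.any (fun z => n1 + z == t) := by
  induction l with
  | nil => simp [aInner2]
  | cons x rest ih => cases h : (n1 + x == t) <;> simp [aInner2, List.any_cons, ih, h]

theorem anyOrBool (l : List Int) (f g : Int → Bool) :
    (l.any fun z => f z || g z) = (l.any f || l.any g) := by
  induction l with
  | nil => rfl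
  | cons x rest ih =>
    simp only [List.any_cons, ih]
    cases f x <;> cases g x <;> simp

theorem contains_add (s : PySem.Set Int) (x y : Int) :
    PySem.Set.contains (PySem.Set.add s x) y = (PySem.Set.contains s y || (y == x)) := by
  apply Bool.eq_iff_iff.mpr
  simp only [PySem.Set.contains, List.contains_iff_mem, Bool.or_eq_true, beq_iff_eq]
  exact PySem.Set.mem_add s x y

-- B's scan is: "t - x seen already" for some x, or a pair inside l
theorem bScan_pairEx (t : Int) (l : List Int) (seen : PySem.Set Int) :
    bScan t l seen = ((l.any fun z => PySem.Set.contains seen (t - z)) || pairEx t l) := by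
  induction l generalizing seen with
  | nil => simp [bScan, pairEx]
  | cons x rest ih =>
    cases h : PySem.Set.contains seen (t - x) with
    | true =>
      have h' : (t - x) ∈ seen := by
        simpa [PySem.Set.contains, List.contains_iff_mem] using h
      simp [bScan, List.any_cons, pairEx, h']
    | false =>
      simp only [bScan, h, Bool.false_eq_true, if_false, ih]
      simp only [contains_add, anyOrBool]
      have e2 : (fun z : Int => t - z == x) = (fun z : Int => x + z == t) := by
        funext z
        apply Bool.eq_iff_iff.mpr
        simp only [beq_iff_eq]
        omega
      rw [e2, ← aInner2_any]
      simp only [List.any_cons, pairEx, h, Bool.false_or]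
      cases rest.any (fun z => PySem.Set.contains seen (t - z)) <;>
        cases aInner2 t x rest <;> simp

-- A's enumerate loop, abstractly: if every inner slice is the matching drop of u
-- and the n1 list is u or u.dropLast, the loop computes pairEx of u
theorem aInner1_pairEx (nums : List Int) (o : ℕ) (idx t : Int) :
    ∀ (ys u : List Int) (off : ℕ),
      (∀ k : ℕ, PySem.List.slice nums (some ((o + off + k : ℕ) : Int)) (some idx) = u.drop k) →
      (ys = u ∨ ys = u.dropLast) →
      aInner1 nums ((o : ℕ) : Int) idx t ys ((off : ℕ) : Int) = pairEx t u := by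
  intro ys
  induction ys with
  | nil =>
    intro u off h hy
    rcases hy with rfl | hy
    · simp [aInner1, pairEx]
    · rcases u with _ | ⟨a, _ | ⟨b, u''⟩⟩
      · simp [aInner1, pairEx]
      · simp [aInner1, pairEx, aInner2]
      · rw [List.dropLast_cons₂] at hy
        simp at hy
  | cons n1 ys' ih =>
    intro u off h hy
    obtain ⟨u', rfl, hy'⟩ : ∃ u', u = n1 :: u' ∧ (ys' = u' ∨ ys' = u'.dropLast) := by
      rcases hy with h1 | h2
      · exact ⟨ys', h1.symm, Or.inl rfl⟩
      · rcases u with _ | ⟨a, _ | ⟨b, u''⟩⟩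
        · simp at h2
        · simp at h2
        · rw [List.dropLast_cons₂] at h2
          injection h2 with hh1 hh2
          exact ⟨b :: u'', by rw [hh1], Or.inr hh2⟩
    simp only [aInner1]
    have hk1 := h 1
    push_cast at hk1
    rw [hk1]
    have hrec : aInner1 nums ((o : ℕ) : Int) idx t ys' (((off : ℕ) : Int) + 1) = pairEx t u' := by
      have h' : ∀ k : ℕ, PySem.List.slice nums (some ((o + (off + 1) + k : ℕ) : Int)) (some idx)
          = u'.drop k := by
        intro k
        have e : o + (off + 1) + k = o + off + (k + 1) := by omega
        rw [e, h (k + 1)]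
        simp
      have := ih u' (off + 1) h' hy'
      push_cast at this
      exact this
    rw [hrec]
    cases ha : aInner2 t n1 ((n1 :: u').drop 1) <;>
      simp only [List.drop_succ_cons, List.drop_zero] at ha <;> simp [pairEx, ha]

-- with stop 0 every inner slice is empty, so A's loop returns false
theorem aInner1_stop_zero (nums : List Int) (o : ℕ) (t : Int) :
    ∀ (ys : List Int) (off : ℕ),
      aInner1 nums ((o : ℕ) : Int) 0 t ys ((off : ℕ) : Int) = false := by
  intro ys
  induction ys with
  | nil => intro off; simp [aInner1]
  | cons n1 ys' ih =>
    intro off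
    simp only [aInner1]
    have hs : PySem.List.slice nums (some (((o : ℕ) : Int) + ((off : ℕ) : Int) + 1)) (some 0) = [] := by
      have e : ((o : ℕ) : Int) + ((off : ℕ) : Int) + 1 = ((o + off + 1 : ℕ) : Int) := by push_cast; ring
      rw [e, sliceNat]
      simp [PySem.List.clampIdx]
    rw [hs]
    have := ih (off + 1)
    push_cast at this
    simpa [aInner2] using this

theorem clamp_pred_cases (n : ℕ) (idx : Int) (h : idx ≠ 0) :
    PySem.List.clampIdx n (idx - 1) = PySem.List.clampIdx n idx ∨
      PySem.List.clampIdx n (idx - 1) + 1 = PySem.List.clampIdx n idx := by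
  simp only [PySem.List.clampIdx]
  split_ifs <;> omega

-- the crux: A's triple-loop found flag equals B's two-sum scan, per window
theorem found_eq (nums : List Int) (t : Int) (o : ℕ) (idx : Int) :
    aInner1 nums ((o : Int)) idx t
        (PySem.List.slice nums (some (o : Int)) (some (idx - 1))) 0
      = bScan t (PySem.List.slice nums (some (o : Int)) (some idx)) PySem.Set.empty := by
  have hb : bScan t (PySem.List.slice nums (some (o : Int)) (some idx)) PySem.Set.empty
      = pairEx t (PySem.List.slice nums (some (o : Int)) (some idx)) := by
    rw [bScan_pairEx]
    simp [PySem.Set.contains, PySem.Set.empty]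
  rw [hb]
  rcases eq_or_ne idx 0 with rfl | hidx
  · -- idx = 0: window slice is empty and every inner slice is empty
    have hw : PySem.List.slice nums (some (o : Int)) (some (0 : Int)) = [] := by
      rw [sliceNat]
      simp [PySem.List.clampIdx]
    rw [hw]
    have hL := aInner1_stop_zero nums o t
      (PySem.List.slice nums (some (o : Int)) (some ((0 : Int) - 1))) 0
    push_cast at hL
    simpa [pairEx] using hL
  · -- idx ≠ 0: the n1 list is the window or its dropLast
    have hclamp_le := PySem.List.clampIdx_le (n := nums.length) (i := idx - 1)
    have hy : PySem.List.slice nums (some (o : Int)) (some (idx - 1))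
        = PySem.List.slice nums (some (o : Int)) (some idx) ∨
        PySem.List.slice nums (some (o : Int)) (some (idx - 1))
        = (PySem.List.slice nums (some (o : Int)) (some idx)).dropLast := by
      rcases clamp_pred_cases nums.length idx hidx with he | he
      · left
        rw [sliceNat, sliceNat, he]
      · right
        rw [sliceNat, sliceNat,
          take_dropLast _ _ (by
            rw [List.length_drop]
            have := PySem.List.clampIdx_le (n := nums.length) (i := idx)
            omega)]
        congr 1
        omega
    have hslice : ∀ k : ℕ, PySem.List.slice nums (some ((o + 0 + k : ℕ) : Int)) (some idx)
        = (PySem.List.slice nums (some (o : Int)) (some idx)).drop k := by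
      intro k
      have e : (o + 0 + k : ℕ) = o + k := by omega
      rw [e, sliceDrop nums o (o + k) idx (by omega)]
      congr 1
      omega
    have hmain := aInner1_pairEx nums o idx t
      (PySem.List.slice nums (some (o : Int)) (some (idx - 1)))
      (PySem.List.slice nums (some (o : Int)) (some idx)) 0 hslice hy
    push_cast at hmain
    exact hmain

theorem outer_eq (nums : List Int) (window : Int) (l : List Int) (o : ℕ) :
    aOuter nums window l (window + (o : Int)) = bOuter nums window l ((o : Int)) := by
  induction l generalizing o with
  | nil => simp [aOuter, bOuter]
  | cons number rest ih =>
    simp only [aOuter, bOuter]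
    have e1 : window + (o : Int) - window = (o : Int) := by ring
    have e2 : (o : Int) + window = window + (o : Int) := by ring
    rw [e1, e2, found_eq nums number o (window + (o : Int))]
    cases hb : bScan number
        (PySem.List.slice nums (some (o : Int)) (some (window + (o : Int)))) PySem.Set.empty
    · simp
    · have := ih (o + 1)
      push_cast at this
      rw [show window + ((o : Int)) + 1 = window + (((o : Int)) + 1) by ring]
      exact this

-- ===== VERDICT (by name: the statement is the Claim_ definition above) =====
theorem addifier_spec : Claim_equal_addifier := by
  intro numbers window _
  unfold Spec_addifier addifier addifier_alt
  have h := outer_eq numbers window (PySem.List.slice numbers (some window) none) 0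
  simpa using h
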